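-- pv_equiv track=rewrite | github.com/rajukaji/python | problems/factorialOfFactorial.py | factorial_of_factorials
-- ===== SOURCE A (Python) =====
-- def factorial_of_factorials(n):
--
--     fact_stack = 1
--     total_fact = 1
--
--     for i in range(2, n+1):
--
--         for j in range(2, i+1):
--             fact_stack *= j
--
--         total_fact *= fact_stack
--         fact_stack = 1
--
--     return total_fact
-- ===== SOURCE B (Python) =====
-- def factorial_of_factorials(n):
--     fact = 1
--     total = 1
--     for i in range(2, n + 1):
--         fact *= i
--         total *= fact
--     return total
-- ===== Notes on version B (the rewrite author's own statement) =====
-- stated objective: simpler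
-- what changed: B keeps one running factorial and multiplies it into the total each step, removing A's inner loop that recomputes i! from scratch for every i; big-integer multiplication cost dominates, so no measured speed-up.
import Mathlib
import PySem

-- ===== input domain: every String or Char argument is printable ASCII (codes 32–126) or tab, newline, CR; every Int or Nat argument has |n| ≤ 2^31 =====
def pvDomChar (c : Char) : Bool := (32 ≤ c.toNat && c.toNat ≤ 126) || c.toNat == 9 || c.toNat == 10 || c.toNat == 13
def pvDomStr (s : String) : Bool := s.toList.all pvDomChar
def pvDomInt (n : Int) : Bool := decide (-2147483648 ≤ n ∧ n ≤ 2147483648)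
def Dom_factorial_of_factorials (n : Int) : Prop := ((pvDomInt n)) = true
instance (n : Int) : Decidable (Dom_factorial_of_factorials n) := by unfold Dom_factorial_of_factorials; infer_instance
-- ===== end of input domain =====

-- B replaces A's inner factorial-recomputation loop by one running factorial (single loop, fewer multiplications; no measured speed-up).

-- ===== PORT A =====
def factorial_of_factorials (n : Int) : Int :=
  (PySem.List.pyRange 2 (n + 1) 1).foldl
    (fun total_fact i =>
      total_fact * ((PySem.List.pyRange 2 (i + 1) 1).foldl (fun fact_stack j => fact_stack * j) 1))
    1

-- ===== PORT B =====
def factorial_of_factorials_alt (n : Int) : Int :=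
  ((PySem.List.pyRange 2 (n + 1) 1).foldl
    (fun (s : Int × Int) i => (s.1 * i, s.2 * (s.1 * i))) (1, 1)).2

-- ===== PRECONDITION & SPEC =====
def Spec_factorial_of_factorials (n : Int) (out : Int) : Prop := out = factorial_of_factorials_alt n
instance (n : Int) (out : Int) : Decidable (Spec_factorial_of_factorials n out) := by unfold Spec_factorial_of_factorials; infer_instance

-- ===== CLAIM (what is proved, stated in full; the proofs are below) =====
def Claim_equal_factorial_of_factorials : Prop := ∀ (n : Int), Dom_factorial_of_factorials n → Spec_factorial_of_factorials n (factorial_of_factorials n)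

-- ===== LEMMAS AND PROOFS =====

/-- A's inner loop: `i!` computed from scratch. -/
def pvInner (i : Int) : Int :=
  (PySem.List.pyRange 2 (i + 1) 1).foldl (fun fact_stack j => fact_stack * j) 1

theorem pvInner_step (a : Int) (h : 2 ≤ a) :
    pvInner a = pvInner (a - 1) * a := by
  unfold pvInner
  rw [show a + 1 = a + 1 from rfl, PySem.List.pyRange_one_succ_right (by omega : (2:Int) ≤ a)]
  rw [show a - 1 + 1 = a from by ring]
  simp [List.foldl_append]

theorem pv_loop (k : Nat) : ∀ (a b t f : Int), (b - a).toNat = k → 2 ≤ a → f = pvInner (a - 1) →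
    ((PySem.List.pyRange a b 1).foldl (fun (s : Int × Int) i => (s.1 * i, s.2 * (s.1 * i))) (f, t)).2
      = (PySem.List.pyRange a b 1).foldl (fun total_fact i => total_fact * pvInner i) t := by
  induction k with
  | zero =>
      intro a b t f hk _ _
      rw [PySem.List.pyRange_one_eq_nil (by omega)]
      simp
  | succ m ih =>
      intro a b t f hk ha hf
      rw [PySem.List.pyRange_one_cons (by omega : a < b)]
      simp only [List.foldl_cons]
      have hstep : t * pvInner a = t * (f * a) := by
        rw [hf, ← pvInner_step a ha]
      rw [hstep]
      exact ih (a + 1) b (t * (f * a)) (f * a) (by omega) (by omega)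
        (by rw [hf, show a + 1 - 1 = a from by ring, pvInner_step a ha])

-- ===== VERDICT (by name: the statement is the Claim_ definition above) =====
theorem factorial_of_factorials_spec : Claim_equal_factorial_of_factorials := by
  intro n _
  unfold Spec_factorial_of_factorials factorial_of_factorials factorial_of_factorials_alt
  have h := pv_loop (n + 1 - 2).toNat 2 (n + 1) 1 1 (by omega) (by omega)
    (by unfold pvInner; rw [PySem.List.pyRange_one_eq_nil (by omega)]; rfl)
  simp only [pvInner] at h
  exact h.symm
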